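-- pv_equiv track=rewrite | github.com/FlorianKrey/DNC | scoring/gen_rttm.py | filter_encompassed_segments
-- ===== SOURCE A (Python) =====
-- def filter_encompassed_segments(segments, min_length):
--     """Remove segments completely contained within another"""
--     sorted_segments = sorted(segments, key=lambda x: x[0])
--     encompassed_indicator = []
--     for segment in segments:
--         start, end, length = segment
--         start_before = [i for i in sorted_segments if i[0] <= start]
--         end_after = [i for i in sorted_segments if i[1] >= end]
--         start_before.remove(segment)
--         end_after.remove(segment)
--         cur_indicator = False
--         if not set(start_before).isdisjoint(end_after):
--             cur_indicator = True
--         if length < min_length: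
--             cur_indicator = True
--         encompassed_indicator.append(cur_indicator)
--     return encompassed_indicator
-- ===== SOURCE B (Python) =====
-- def filter_encompassed_segments(segments, min_length):
--     """Remove segments completely contained within another.
--
--     Sort-and-sweep re-implementation: sort the indexed segments by
--     (start ascending, end descending) and sweep once, tracking the running
--     maximum end.  A segment is encompassed iff some earlier item of that
--     order has end >= its end, or its exact (start, end) pair occurs at
--     least twice in the input.  O(n log n) instead of A's O(n^2)."""
--     pair_count = {}
--     for s, e, _l in segments:
--         pair_count[(s, e)] = pair_count.get((s, e), 0) + 1
--     flags = {}
--     max_end = None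
--     for i, (s, e, l) in sorted(enumerate(segments), key=lambda p: (p[1][0], -p[1][1])):
--         dominated = (max_end is not None and max_end >= e) or pair_count[(s, e)] >= 2
--         flags[i] = dominated or l < min_length
--         if max_end is None or e > max_end:
--             max_end = e
--     return [flags[i] for i in range(len(segments))]
-- ===== Notes on version B (the rewrite author's own statement) =====
-- stated objective: faster
-- what changed: A rebuilds two filtered copies of the sorted list and intersects them as sets for every segment (quadratic); B sorts the indexed segments once by (start asc, end desc) and sweeps them tracking the running maximum end, using a precomputed (start, end) pair counter for exact duplicates.
import Mathlib
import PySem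

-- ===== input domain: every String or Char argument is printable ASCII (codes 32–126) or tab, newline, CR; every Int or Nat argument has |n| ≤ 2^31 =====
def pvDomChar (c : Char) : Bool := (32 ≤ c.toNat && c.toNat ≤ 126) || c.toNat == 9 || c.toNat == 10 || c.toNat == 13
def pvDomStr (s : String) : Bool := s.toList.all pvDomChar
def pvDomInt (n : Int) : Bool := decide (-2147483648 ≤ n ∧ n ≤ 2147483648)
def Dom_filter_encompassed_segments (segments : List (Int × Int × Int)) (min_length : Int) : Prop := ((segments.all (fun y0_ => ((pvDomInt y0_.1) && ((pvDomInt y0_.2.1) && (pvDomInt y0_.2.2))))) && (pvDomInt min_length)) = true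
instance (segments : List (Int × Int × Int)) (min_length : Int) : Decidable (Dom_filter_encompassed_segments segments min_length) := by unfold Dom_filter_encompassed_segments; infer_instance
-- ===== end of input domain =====

-- B replaces A's quadratic per-segment scans by one sort-and-sweep pass; equal return values proved below.

-- ===== PORT A =====
-- loop body of A's 'for segment in segments' (a literal transliteration, kept as a named helper)
def pvABody (sorted_segments : List (Int × Int × Int)) (min_length : Int)
    (segment : Int × Int × Int) : Bool :=
  let start := segment.1
  let endv := segment.2.1
  let length := segment.2.2
  let start_before := sorted_segments.filter (fun i => decide (i.1 ≤ start))
  let end_after := sorted_segments.filter (fun i => decide (i.2.1 ≥ endv))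
  -- 'list.remove' never raises here: 'segment' itself belongs to both lists, so the none branch is unreachable
  let start_before := (PySem.List.remove? start_before segment).getD []
  let end_after := (PySem.List.remove? end_after segment).getD []
  let cur_indicator := false
  let cur_indicator := if !(PySem.Set.isdisjoint (PySem.Set.ofList start_before) end_after) then true else cur_indicator
  let cur_indicator := if length < min_length then true else cur_indicator
  cur_indicator

def filter_encompassed_segments (segments : List (Int × Int × Int)) (min_length : Int) : List Bool :=
  let sorted_segments := PySem.List.sorted segments (fun x => x.1)
  segments.foldl (fun acc segment => acc ++ [pvABody sorted_segments min_length segment]) []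

-- ===== PORT B =====
-- 'max_end is not None and max_end >= e'
def pvMTest (mx : Option Int) (e : Int) : Bool :=
  match mx with
  | some m => decide (e ≤ m)
  | none => false

-- 'if max_end is None or e > max_end: max_end = e'
def pvNewMax (mx : Option Int) (e : Int) : Option Int :=
  match mx with
  | none => some e
  | some m => if e > m then some e else some m

-- loop body of B's sweep: write this index's flag, update the running maximum end
def pvStepB (min_length : Int) (pair_count : PySem.Dict (Int × Int) Int)
    (st : PySem.Dict Int Bool × Option Int) (p : Int × (Int × Int × Int)) :
    PySem.Dict Int Bool × Option Int :=
  (st.1.insert p.1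
      ((pvMTest st.2 p.2.2.1 || decide (2 ≤ pair_count.getD (p.2.1, p.2.2.1) 0))
        || decide (p.2.2.2 < min_length)),
    pvNewMax st.2 p.2.2.1)

def filter_encompassed_segments_alt (segments : List (Int × Int × Int)) (min_length : Int) : List Bool :=
  let pair_count := segments.foldl
    (fun d x => d.insert (x.1, x.2.1) (d.getD (x.1, x.2.1) 0 + 1)) PySem.Dict.empty
  let order := PySem.List.sorted2 (PySem.List.enumerate segments) (fun p => p.2.1) (fun p => -p.2.2.1)
  let final := order.foldl (pvStepB min_length pair_count) (PySem.Dict.empty, none)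
  -- 'flags[i]' is always present (every index is written exactly once), so the default is never taken
  (PySem.List.pyRange 0 (segments.length : Int)).map (fun i => final.1.getD i false)

-- ===== PRECONDITION & SPEC =====
def Spec_filter_encompassed_segments (segments : List (Int × Int × Int)) (min_length : Int) (out : List Bool) : Prop := out = filter_encompassed_segments_alt segments min_length
instance (segments : List (Int × Int × Int)) (min_length : Int) (out : List Bool) : Decidable (Spec_filter_encompassed_segments segments min_length out) := by unfold Spec_filter_encompassed_segments; infer_instance

-- ===== CLAIM (what is proved, stated in full; the proofs are below) =====
def Claim_equal_filter_encompassed_segments : Prop := ∀ (segments : List (Int × Int × Int)) (min_length : Int), Dom_filter_encompassed_segments segments min_length → Spec_filter_encompassed_segments segments min_length (filter_encompassed_segments segments min_length)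

-- ===== LEMMAS AND PROOFS =====

-- Common reference value: a segment is flagged iff some OTHER occurrence dominates it
-- (start' ≤ start and end' ≥ end, an exact (start, end) duplicate included),
-- or it is shorter than min_length.
def pvCoveredBy (segs : List (Int × Int × Int)) (seg : Int × Int × Int) : Prop :=
  ∃ x ∈ segs, x ≠ seg ∧ x.1 ≤ seg.1 ∧ seg.2.1 ≤ x.2.1

def pvCoveredB (segs : List (Int × Int × Int)) (seg : Int × Int × Int) : Bool :=
  segs.any (fun x => (!(x == seg) && decide (x.1 ≤ seg.1)) && decide (seg.2.1 ≤ x.2.1))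

theorem pvCoveredB_iff (segs : List (Int × Int × Int)) (seg : Int × Int × Int) :
    pvCoveredB segs seg = true ↔ pvCoveredBy segs seg := by
  simp [pvCoveredB, pvCoveredBy, and_assoc]

def pvPairP (seg : Int × Int × Int) : (Int × Int × Int) → Bool :=
  fun x => decide ((x.1, x.2.1) = (seg.1, seg.2.1))

def pvRef (segs : List (Int × Int × Int)) (ml : Int) (seg : Int × Int × Int) : Bool :=
  (pvCoveredB segs seg || decide (2 ≤ segs.countP (pvPairP seg))) || decide (seg.2.2 < ml)

-- membership in an erase, by counting
theorem pv_mem_erase_iff_count (v w : Int × Int × Int) (l : List (Int × Int × Int)) :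
    v ∈ l.erase w ↔ (if v = w then 1 else 0) < l.count v := by
  rw [← List.count_pos_iff, List.count_erase]
  by_cases h : v = w
  · subst h
    simp only [beq_self_eq_true, if_true]
    omega
  · have hb : (w == v) = false := beq_eq_false_iff_ne.mpr (Ne.symm h)
    rw [if_neg h]
    simp only [hb, Bool.false_eq_true, if_false]
    omega

-- count in a filtered list
theorem pv_count_filter (v : Int × Int × Int) (p : (Int × Int × Int) → Bool) (l : List (Int × Int × Int)) :
    (l.filter p).count v = if p v then l.count v else 0 := by
  by_cases h : p v = true
  · rw [if_pos h, List.count_filter h]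
  · rw [if_neg h, List.count_eq_zero]
    intro hmem
    exact h (List.of_mem_filter hmem)

-- the propositional core shared by both sides
theorem pv_cond_iff (segs : List (Int × Int × Int)) (seg : Int × Int × Int) (hseg : seg ∈ segs) :
    (∃ v : Int × Int × Int, (v.1 ≤ seg.1 ∧ seg.2.1 ≤ v.2.1) ∧ (if v = seg then 1 else 0) < segs.count v)
    ↔ (pvCoveredBy segs seg ∨ 2 ≤ segs.countP (pvPairP seg)) := by
  constructor
  · rintro ⟨v, ⟨h1, h2⟩, hc⟩
    by_cases hv : v = seg
    · subst hv
      right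
      have hcnt : 2 ≤ segs.count v := by simpa using hc
      have hmono : segs.countP (· == v) ≤ segs.countP (pvPairP v) := by
        apply List.countP_mono_left
        intro x _ hx
        have : x = v := by simpa [beq_iff_eq] using hx
        simp [pvPairP, this]
      have hce : segs.count v = segs.countP (· == v) := List.count_eq_countP ..
      omega
    · left
      exact ⟨v, List.count_pos_iff.mp (by simpa [hv] using hc), hv, h1, h2⟩
  · rintro (⟨x, hx, hne, h1, h2⟩ | hdup)
    · exact ⟨x, ⟨h1, h2⟩, by rw [if_neg hne]; exact List.count_pos_iff.mpr hx⟩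
    · by_cases hdom : pvCoveredBy segs seg
      · obtain ⟨x, hx, hne, h1, h2⟩ := hdom
        exact ⟨x, ⟨h1, h2⟩, by rw [if_neg hne]; exact List.count_pos_iff.mpr hx⟩
      · refine ⟨seg, ⟨le_refl _, le_refl _⟩, ?_⟩
        rw [if_pos rfl]
        have hmono : segs.countP (pvPairP seg) ≤ segs.countP (· == seg) := by
          apply List.countP_mono_left
          intro x hxmem hpx
          by_contra hne'
          have hxne : x ≠ seg := by simpa [beq_iff_eq] using hne'
          have hpair : (x.1, x.2.1) = (seg.1, seg.2.1) := by simpa [pvPairP] using hpx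
          have h12 : x.1 = seg.1 ∧ x.2.1 = seg.2.1 := by simpa [Prod.ext_iff] using hpair
          exact hdom ⟨x, hxmem, hxne, le_of_eq h12.1, le_of_eq h12.2.symm⟩
        have hce : segs.count seg = segs.countP (· == seg) := List.count_eq_countP ..
        omega

-- A's per-segment body computes pvRef
theorem pvA_body_eq (segs : List (Int × Int × Int)) (ml : Int) (seg : Int × Int × Int) (hseg : seg ∈ segs) :
    pvABody (PySem.List.sorted segs (fun x => x.1)) ml seg = pvRef segs ml seg := by
  have hsortmem : seg ∈ PySem.List.sorted segs (fun x => x.1) :=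
    (PySem.List.mem_sorted _ _ _ _).mpr hseg
  have hsb : seg ∈ (PySem.List.sorted segs (fun x => x.1)).filter (fun i => decide (i.1 ≤ seg.1)) :=
    List.mem_filter.mpr ⟨hsortmem, by simp⟩
  have hea : seg ∈ (PySem.List.sorted segs (fun x => x.1)).filter (fun i => decide (i.2.1 ≥ seg.2.1)) :=
    List.mem_filter.mpr ⟨hsortmem, by simp⟩
  have hcnt : ∀ v, (PySem.List.sorted segs (fun x => x.1)).count v = segs.count v :=
    (PySem.List.sorted_perm segs (fun x => x.1) false).count_eq
  show (if seg.2.2 < ml then true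
      else if (!(PySem.Set.isdisjoint
          (PySem.Set.ofList ((PySem.List.remove? ((PySem.List.sorted segs (fun x => x.1)).filter (fun i => decide (i.1 ≤ seg.1))) seg).getD []))
          ((PySem.List.remove? ((PySem.List.sorted segs (fun x => x.1)).filter (fun i => decide (i.2.1 ≥ seg.2.1))) seg).getD []))) = true
        then true else false)
    = pvRef segs ml seg
  rw [PySem.List.remove?_eq_some_erase _ seg hsb, PySem.List.remove?_eq_some_erase _ seg hea]
  simp only [Option.getD_some]
  by_cases hml : seg.2.2 < ml
  · simp [pvRef, hml]
  · rw [if_neg hml]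
    have hrefeq : pvRef segs ml seg = (pvCoveredB segs seg || decide (2 ≤ segs.countP (pvPairP seg))) := by
      simp [pvRef, hml]
    rw [hrefeq]
    have hb : ∀ b : Bool, ((if b = true then true else false) = true ↔ b = true) := fun b => by
      cases b <;> simp
    have hchar : ∀ v : Int × Int × Int,
        (v ∈ ((PySem.List.sorted segs (fun x => x.1)).filter (fun i => decide (i.1 ≤ seg.1))).erase seg ∧
         v ∈ ((PySem.List.sorted segs (fun x => x.1)).filter (fun i => decide (i.2.1 ≥ seg.2.1))).erase seg)
        ↔ ((v.1 ≤ seg.1 ∧ seg.2.1 ≤ v.2.1) ∧ (if v = seg then 1 else 0) < segs.count v) := by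
      intro v
      rw [pv_mem_erase_iff_count, pv_mem_erase_iff_count, pv_count_filter, pv_count_filter, hcnt]
      by_cases hbv : v.1 ≤ seg.1 <;> by_cases hev : seg.2.1 ≤ v.2.1 <;> by_cases hv : v = seg <;>
        simp [hbv, hev, hv, ge_iff_le]
    have hdisj : (!(PySem.Set.isdisjoint
          (PySem.Set.ofList (((PySem.List.sorted segs (fun x => x.1)).filter (fun i => decide (i.1 ≤ seg.1))).erase seg))
          (((PySem.List.sorted segs (fun x => x.1)).filter (fun i => decide (i.2.1 ≥ seg.2.1))).erase seg))) = true
        ↔ ∃ v : Int × Int × Int,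
            (v ∈ ((PySem.List.sorted segs (fun x => x.1)).filter (fun i => decide (i.1 ≤ seg.1))).erase seg ∧
             v ∈ ((PySem.List.sorted segs (fun x => x.1)).filter (fun i => decide (i.2.1 ≥ seg.2.1))).erase seg) := by
      simp [PySem.Set.isdisjoint, List.any_eq_true, PySem.Set.mem_ofList]
    have hlast : (pvCoveredBy segs seg ∨ 2 ≤ segs.countP (pvPairP seg))
        ↔ (pvCoveredB segs seg || decide (2 ≤ segs.countP (pvPairP seg))) = true := by
      simp [Bool.or_eq_true, pvCoveredB_iff]
    rw [Bool.eq_iff_iff]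
    exact (hb _).trans (hdisj.trans ((exists_congr hchar).trans ((pv_cond_iff segs seg hseg).trans hlast)))

theorem pvA_eq_ref (segs : List (Int × Int × Int)) (ml : Int) :
    filter_encompassed_segments segs ml = segs.map (pvRef segs ml) := by
  unfold filter_encompassed_segments
  rw [PySem.List.foldl_append_singleton_eq_map (f := pvABody (PySem.List.sorted segs (fun x => x.1)) ml)]
  simp only [List.nil_append]
  exact List.map_congr_left (fun seg hseg => pvA_body_eq segs ml seg hseg)

-- ---- B side ----

-- sorted2 with Int keys is sorted by the lexicographic key
theorem pv_sorted2_eq_sorted_lex {α : Type} (xs : List α) (k1 k2 : α → Int) :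
    PySem.List.sorted2 xs k1 k2 = PySem.List.sorted xs (fun x => toLex (k1 x, k2 x)) := by
  rw [PySem.List.sorted_eq_foldl_insertBy]
  show List.foldl (fun acc x => PySem.List.insertBy _ x acc) [] xs = _
  have hlt : (fun a b => decide (k1 a < k1 b) || (!decide (k1 b < k1 a) && decide (k2 a < k2 b)))
      = (fun a b => decide ((fun x => toLex (k1 x, k2 x)) a < (fun x => toLex (k1 x, k2 x)) b)) := by
    funext a b
    rw [Bool.eq_iff_iff]
    simp only [Bool.or_eq_true, Bool.and_eq_true, Bool.not_eq_true', decide_eq_true_eq,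
      decide_eq_false_iff_not, Prod.Lex.toLex_lt_toLex]
    omega
  rw [hlt]
  simp

theorem pv_foldl_step_snd (ml : Int) (pc : PySem.Dict (Int × Int) Int)
    (l : List (Int × (Int × Int × Int))) (st : PySem.Dict Int Bool × Option Int) :
    (l.foldl (pvStepB ml pc) st).2 = l.foldl (fun m p => pvNewMax m p.2.2.1) st.2 := by
  induction l generalizing st with
  | nil => rfl
  | cons p rest ih => simpa [pvStepB] using ih _

theorem pv_foldl_step_untouched (ml : Int) (pc : PySem.Dict (Int × Int) Int)
    (l : List (Int × (Int × Int × Int))) (st : PySem.Dict Int Bool × Option Int) (k : Int)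
    (hk : ∀ p ∈ l, p.1 ≠ k) :
    ((l.foldl (pvStepB ml pc) st).1.getD k false) = st.1.getD k false := by
  induction l generalizing st with
  | nil => rfl
  | cons p rest ih =>
    rw [List.foldl_cons, ih _ (fun q hq => hk q (List.mem_cons_of_mem _ hq))]
    simp only [pvStepB, PySem.Dict.getD_insert]
    rw [if_neg (fun h => hk p List.mem_cons_self h.symm)]

theorem pv_mtest_foldl (l : List (Int × (Int × Int × Int))) (mx : Option Int) (e : Int) :
    pvMTest (l.foldl (fun m p => pvNewMax m p.2.2.1) mx) e
      = (l.any (fun p => decide (e ≤ p.2.2.1)) || pvMTest mx e) := by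
  induction l generalizing mx with
  | nil => simp
  | cons p rest ih =>
    rw [List.foldl_cons, ih]
    have h : pvMTest (pvNewMax mx p.2.2.1) e = (decide (e ≤ p.2.2.1) || pvMTest mx e) := by
      rcases mx with _ | m
      · simp [pvNewMax, pvMTest]
      · simp only [pvNewMax, pvMTest]
        by_cases hgt : p.2.2.1 > m
        · rw [if_pos hgt, Bool.eq_iff_iff]; simp; omega
        · rw [if_neg hgt, Bool.eq_iff_iff]; simp; omega
    rw [List.any_cons, h]
    cases rest.any (fun p => decide (e ≤ p.2.2.1)) <;> cases decide (e ≤ p.2.2.1) <;>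
      cases pvMTest mx e <;> rfl

theorem pv_pc_getD (l : List (Int × Int × Int)) (d : PySem.Dict (Int × Int) Int) (key : Int × Int) :
    ((l.foldl (fun d x => d.insert (x.1, x.2.1) (d.getD (x.1, x.2.1) 0 + 1)) d).getD key 0)
      = d.getD key 0 + (l.countP (fun x => decide ((x.1, x.2.1) = key)) : Int) := by
  induction l generalizing d with
  | nil => simp
  | cons x rest ih =>
    rw [List.foldl_cons, ih, List.countP_cons, PySem.Dict.getD_insert]
    by_cases h : key = (x.1, x.2.1)
    · rw [if_pos h, if_pos (by simp [h]), h]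
      push_cast
      ring
    · rw [if_neg h, if_neg (by simpa [eq_comm] using h)]
      push_cast
      ring

-- two positions that satisfy a predicate give countP ≥ 2
theorem pv_countP_two (l : List (Int × Int × Int)) (p : (Int × Int × Int) → Bool)
    (i j : Nat) (hij : i < j) (hj : j < l.length) (hpi : p (l[i]'(Nat.lt_trans hij hj)) = true)
    (hpj : p l[j] = true) : 2 ≤ l.countP p := by
  have hi : i < l.length := Nat.lt_trans hij hj
  have h1 : 0 < (l.take j).countP p := by
    apply List.countP_pos_iff.mpr
    refine ⟨l[i], ?_, hpi⟩
    have hlen : i < (l.take j).length := by simp [List.length_take]; omega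
    have hget : (l.take j)[i]'hlen = l[i] := List.getElem_take
    exact hget ▸ List.getElem_mem hlen
  have h2 : 0 < (l.drop j).countP p := by
    apply List.countP_pos_iff.mpr
    refine ⟨l[j], ?_, hpj⟩
    rw [List.drop_eq_getElem_cons hj]
    exact List.mem_cons_self
  have h3 : l.countP p = (l.take j).countP p + (l.drop j).countP p := by
    conv_lhs => rw [← List.take_append_drop j l]
    exact List.countP_append ..
  omega

-- countP ≥ 2 from two distinct indices satisfying the predicate (either order)
theorem pv_countP_two' (l : List (Int × Int × Int)) (p : (Int × Int × Int) → Bool)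
    (i j : Nat) (hne : i ≠ j) (hi : i < l.length) (hj : j < l.length) (hpi : p l[i] = true)
    (hpj : p l[j] = true) : 2 ≤ l.countP p := by
  rcases Nat.lt_or_ge i j with h | h
  · exact pv_countP_two l p i j h hj hpi hpj
  · exact pv_countP_two l p j i (by omega) hi hpj hpi

theorem pvB_eq_ref (segs : List (Int × Int × Int)) (ml : Int) :
    filter_encompassed_segments_alt segs ml = segs.map (pvRef segs ml) := by
  have hdef : filter_encompassed_segments_alt segs ml =
      (PySem.List.pyRange 0 (segs.length : Int)).map
        (fun i => ((PySem.List.sorted2 (PySem.List.enumerate segs) (fun p => p.2.1) (fun p => -p.2.2.1)).foldl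
            (pvStepB ml (segs.foldl (fun d x => d.insert (x.1, x.2.1) (d.getD (x.1, x.2.1) 0 + 1)) PySem.Dict.empty))
            (PySem.Dict.empty, none)).1.getD i false) := rfl
  rw [hdef, pv_sorted2_eq_sorted_lex]
  apply List.ext_getElem
  · simp [PySem.List.length_pyRange_one]
  intro k hkL hkR
  have hk : k < segs.length := by simpa [PySem.List.length_pyRange_one] using hkL
  rw [List.getElem_map, List.getElem_map, PySem.List.getElem_pyRange_one]
  simp only [zero_add]
  -- facts about the sorted order
  have hperm : (PySem.List.sorted (PySem.List.enumerate segs) (fun p => toLex (p.2.1, -p.2.2.1))).Perm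
      (PySem.List.enumerate segs) := PySem.List.sorted_perm _ _ _
  have hmemE : ((k : Int), segs[k]) ∈ PySem.List.enumerate segs :=
    (PySem.List.mem_enumerate_iff _ _ _).mpr ⟨k, hk, by simp⟩
  have hmem : ((k : Int), segs[k]) ∈ PySem.List.sorted (PySem.List.enumerate segs) (fun p => toLex (p.2.1, -p.2.2.1)) :=
    hperm.mem_iff.mpr hmemE
  obtain ⟨l1, l2, hsplit⟩ := List.append_of_mem hmem
  have hnodup : ((PySem.List.sorted (PySem.List.enumerate segs) (fun p => toLex (p.2.1, -p.2.2.1))).map (fun p => p.1)).Nodup := by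
    have h1 : ((PySem.List.enumerate segs).map (fun p => p.1)).Nodup := by
      rw [PySem.List.map_fst_enumerate]
      exact PySem.List.nodup_pyRange_one _ _
    exact ((hperm.map (fun p => p.1)).nodup_iff).mpr h1
  rw [hsplit, List.map_append, List.map_cons] at hnodup
  have hcnt1 := List.nodup_iff_count_le_one.mp hnodup ((k : Int))
  rw [List.count_append, List.count_cons_self] at hcnt1
  have hnotin1 : ((k : Int)) ∉ l1.map (fun p => p.1) := fun h => by
    have := List.count_pos_iff.mpr h; omega
  have hnotin2 : ((k : Int)) ∉ l2.map (fun p => p.1) := fun h => by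
    have := List.count_pos_iff.mpr h; omega
  have hne1 : ∀ p ∈ l1, p.1 ≠ (k : Int) := fun p hp h => hnotin1 (h ▸ List.mem_map_of_mem hp)
  have hne2 : ∀ p ∈ l2, p.1 ≠ (k : Int) := fun p hp h => hnotin2 (h ▸ List.mem_map_of_mem hp)
  -- pairwise order facts
  have hpwAll := PySem.List.sorted_pairwise (PySem.List.enumerate segs) (fun p => toLex (p.2.1, -p.2.2.1))
  rw [hsplit, List.pairwise_append] at hpwAll
  obtain ⟨-, hpw2, hcross⟩ := hpwAll
  have hbefore : ∀ p ∈ l1, toLex (p.2.1, -p.2.2.1) ≤ toLex ((segs[k]).1, -(segs[k]).2.1) :=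
    fun p hp => hcross p hp _ List.mem_cons_self
  have hafter : ∀ p ∈ l2, toLex ((segs[k]).1, -(segs[k]).2.1) ≤ toLex (p.2.1, -p.2.2.1) :=
    (List.pairwise_cons.mp hpw2).1
  -- evaluate the fold at index k
  rw [hsplit, List.foldl_append, List.foldl_cons]
  rw [pv_foldl_step_untouched _ _ l2 _ _ hne2]
  simp only [pvStepB, PySem.Dict.getD_insert, if_true]
  rw [pv_foldl_step_snd, pv_mtest_foldl]
  simp only [pvMTest, Bool.or_false]
  rw [pv_pc_getD]
  simp only [PySem.Dict.getD_empty, zero_add]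
  -- now a Bool equation; compare with pvRef
  rw [Bool.eq_iff_iff]
  simp only [pvRef, Bool.or_eq_true, pvCoveredB_iff, decide_eq_true_eq, List.any_eq_true]
  rw [show ((2 : Int) ≤ ((List.countP (fun x => decide ((x.1, x.2.1) = (segs[k].1, segs[k].2.1))) segs : Nat) : Int))
      ↔ 2 ≤ List.countP (pvPairP segs[k]) segs from by unfold pvPairP; omega]
  constructor
  · rintro ((⟨p, hp, hpe⟩ | hdup) | hml)
    · -- an earlier element of the sweep dominates
      have hpord : p ∈ PySem.List.sorted (PySem.List.enumerate segs) (fun p => toLex (p.2.1, -p.2.2.1)) := by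
        rw [hsplit]; exact List.mem_append_left _ hp
      obtain ⟨j, hj, hpj⟩ := (PySem.List.mem_enumerate_iff _ _ _).mp (hperm.mem_iff.mp hpord)
      have hkey := hbefore p hp
      rw [Prod.Lex.le_iff] at hkey
      simp only [ofLex_toLex] at hkey
      have hpe' : segs[k].2.1 ≤ p.2.2.1 := by simpa using hpe
      have hx1 : p.2.1 ≤ segs[k].1 := by rcases hkey with h | ⟨h, -⟩ <;> omega
      by_cases hxseg : p.2 = segs[k]
      · left; right
        have hjk : j ≠ k := by
          intro h
          subst h
          apply hne1 p hp
          rw [hpj]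
          simp
        have hpsnd : p.2 = segs[j] := by rw [hpj]
        apply pv_countP_two' segs _ j k hjk hj hk
        · rw [← hpsnd, hxseg]; simp [pvPairP]
        · simp [pvPairP]
      · left; left
        refine ⟨p.2, ?_, hxseg, hx1, hpe'⟩
        rw [hpj]
        exact List.getElem_mem hj
    · left; right; exact hdup
    · right; exact hml
  · rintro ((⟨x, hxmem, hne, h1, h2⟩ | hdup) | hml)
    · -- a dominating other occurrence: find it in the sweep order
      obtain ⟨j, hj, hxj⟩ := List.getElem_of_mem hxmem
      have hjk : j ≠ k := by
        intro h
        subst h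
        exact hne hxj.symm
      have hpE : ((j : Int), segs[j]) ∈ PySem.List.sorted (PySem.List.enumerate segs) (fun p => toLex (p.2.1, -p.2.2.1)) :=
        hperm.mem_iff.mpr ((PySem.List.mem_enumerate_iff _ _ _).mpr ⟨j, hj, by simp⟩)
      rw [hsplit] at hpE
      rcases List.mem_append.mp hpE with hp1 | hp2
      · left; left
        refine ⟨((j : Int), segs[j]), hp1, by simpa [hxj] using h2⟩
      rcases List.mem_cons.mp hp2 with heq | hp2'
      · exfalso
        have : (j : Int) = (k : Int) := congrArg Prod.fst heq
        exact hjk (by exact_mod_cast this)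
      · have hkey := hafter _ hp2'
        rw [Prod.Lex.le_iff] at hkey
        simp only [ofLex_toLex] at hkey
        simp at hkey
        have hxj1 : x.1 = segs[j].1 := by rw [hxj]
        have hxj2 : x.2.1 = segs[j].2.1 := by rw [hxj]
        have hj1 : segs[j].1 = segs[k].1 ∧ segs[j].2.1 = segs[k].2.1 := by
          rcases hkey with h | ⟨ha, hb⟩ <;> constructor <;> omega
        left; right
        apply pv_countP_two' segs _ j k hjk hj hk
        · simp [pvPairP, hj1.1, hj1.2]
        · simp [pvPairP]
    · left; right; exact hdup
    · right; exact hml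

-- ===== VERDICT (by name: the statement is the Claim_ definition above) =====
theorem filter_encompassed_segments_spec : Claim_equal_filter_encompassed_segments := by
  intro segs ml _
  unfold Spec_filter_encompassed_segments
  rw [pvA_eq_ref, pvB_eq_ref]
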